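-- pv_equiv track=rewrite | github.com/Kushagra9399/dpc2025 | day21.py | insert_ele
-- ===== SOURCE A (Python) =====
-- def insert_ele(arr, ele):
--     if not len(arr):
--         arr.append(ele)
--         return arr
--     a = arr.pop()
--     arr = insert_ele(arr, ele)
--     arr.append(a)
--     return arr
-- ===== SOURCE B (Python) =====
-- def insert_ele(arr, ele):
--     arr.insert(0, ele)
--     return arr
-- ===== Notes on version B (the rewrite author's own statement) =====
-- stated objective: idiomatic
-- what changed: Replaces A's recursive pop-everything-then-reappend traversal with a single in-place list.insert(0, ele) (same object mutated and returned).
import Mathlib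
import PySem

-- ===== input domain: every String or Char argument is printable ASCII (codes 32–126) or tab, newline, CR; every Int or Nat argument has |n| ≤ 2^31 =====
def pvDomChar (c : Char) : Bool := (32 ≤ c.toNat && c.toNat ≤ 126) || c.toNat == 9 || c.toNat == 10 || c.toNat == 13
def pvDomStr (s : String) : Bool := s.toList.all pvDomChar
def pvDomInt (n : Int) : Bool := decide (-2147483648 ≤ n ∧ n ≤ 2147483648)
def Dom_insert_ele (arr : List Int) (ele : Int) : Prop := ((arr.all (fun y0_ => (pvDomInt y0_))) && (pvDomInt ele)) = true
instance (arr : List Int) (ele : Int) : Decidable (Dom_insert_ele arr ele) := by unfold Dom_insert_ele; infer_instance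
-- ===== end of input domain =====

-- ===== PORT A =====
-- A: if arr is empty, append ele and return; else pop the last element, recurse, re-append it.
def insert_ele (arr : List Int) (ele : Int) : List Int :=
  if h : arr.length = 0 then arr ++ [ele]
  else
    let a := arr.getLast (by intro he; simp [he] at h)
    insert_ele arr.dropLast ele ++ [a]
termination_by arr.length
decreasing_by
  have : arr ≠ [] := by intro he; simp [he] at h
  simp [List.length_dropLast]; omega

-- ===== PORT B =====
-- B: in-place insert at the front (arr.insert(0, ele)); return value is ele :: arr.
def insert_ele_alt (arr : List Int) (ele : Int) : List Int := ele :: arr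

-- ===== PRECONDITION & SPEC =====
def Spec_insert_ele (arr : List Int) (ele : Int) (out : List Int) : Prop := out = insert_ele_alt arr ele
instance (arr : List Int) (ele : Int) (out : List Int) : Decidable (Spec_insert_ele arr ele out) := by unfold Spec_insert_ele; infer_instance

-- ===== CLAIM (what is proved, stated in full; the proofs are below) =====
def Claim_equal_insert_ele : Prop := ∀ (arr : List Int) (ele : Int), Dom_insert_ele arr ele → Spec_insert_ele arr ele (insert_ele arr ele)

-- ===== LEMMAS AND PROOFS =====

-- ===== VERDICT (by name: the statement is the Claim_ definition above) =====
theorem insert_ele_eq_cons (arr : List Int) (ele : Int) : insert_ele arr ele = ele :: arr := by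
  induction arr using insert_ele.induct with
  | case1 arr h => simp at h; simp [insert_ele, h]
  | case2 arr h ih =>
    have hne : arr ≠ [] := by intro he; simp [he] at h
    rw [insert_ele]
    simp only [dif_neg h]
    rw [ih]
    simp [List.dropLast_append_getLast hne]

theorem insert_ele_spec : Claim_equal_insert_ele := by
  intro arr ele _
  unfold Spec_insert_ele insert_ele_alt
  exact insert_ele_eq_cons arr ele
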